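-- pv_equiv track=rewrite | github.com/vagrant28/KernelGAT | mymodel/gumbel_dataset.py | shorten_sentences
-- ===== SOURCE A (Python) =====
-- def shorten_sentences(tokenized_sentences, max_length):
--     total_len = sum([len(sent) for sent in tokenized_sentences])
--     while total_len > max_length:
--         sorted_indices = sorted(range(len(tokenized_sentences)), key=lambda i: len(tokenized_sentences[i]), reverse=True)
--         longest_ind = sorted_indices[0]
--         tokenized_sentences[longest_ind] = tokenized_sentences[longest_ind][:-1]
--         total_len = sum([len(sent) for sent in tokenized_sentences])
--     return tokenized_sentences
-- ===== SOURCE B (Python) =====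
-- def shorten_sentences(tokenized_sentences, max_length):
--     total = sum(len(s) for s in tokenized_sentences)
--     if total <= max_length:
--         return tokenized_sentences
--     lengths = [len(s) for s in tokenized_sentences]
--
--     def cap_sum(level):
--         return sum(min(x, level) for x in lengths)
--
--     # binary search for the largest L with cap_sum(L) <= max_length
--     # invariant: cap_sum(lo) <= max_length < cap_sum(hi)
--     lo, hi = 0, max(lengths)
--     while hi - lo > 1:
--         mid = (lo + hi) // 2
--         if cap_sum(mid) <= max_length:
--             lo = mid
--         else:
--             hi = mid
--     L = lo
--     s = cap_sum(L + 1) - max_length  # boundary sentences trimmed to L instead of L + 1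
--     out = []
--     for sent in tokenized_sentences:
--         if len(sent) <= L:
--             out.append(sent)
--         elif s > 0:
--             out.append(sent[:L])
--             s -= 1
--         else:
--             out.append(sent[:L + 1])
--     return out
-- ===== Notes on version B (the rewrite author's own statement) =====
-- stated objective: faster
-- what changed: A repeatedly re-sorts all indices and removes one token per iteration; B computes the final levelled lengths directly by binary-searching the water-filling level L on the capped-sum function and then builds the output in one pass, trimming the first few over-long sentences to level L and the remaining long ones to L+1.
import Mathlib
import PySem

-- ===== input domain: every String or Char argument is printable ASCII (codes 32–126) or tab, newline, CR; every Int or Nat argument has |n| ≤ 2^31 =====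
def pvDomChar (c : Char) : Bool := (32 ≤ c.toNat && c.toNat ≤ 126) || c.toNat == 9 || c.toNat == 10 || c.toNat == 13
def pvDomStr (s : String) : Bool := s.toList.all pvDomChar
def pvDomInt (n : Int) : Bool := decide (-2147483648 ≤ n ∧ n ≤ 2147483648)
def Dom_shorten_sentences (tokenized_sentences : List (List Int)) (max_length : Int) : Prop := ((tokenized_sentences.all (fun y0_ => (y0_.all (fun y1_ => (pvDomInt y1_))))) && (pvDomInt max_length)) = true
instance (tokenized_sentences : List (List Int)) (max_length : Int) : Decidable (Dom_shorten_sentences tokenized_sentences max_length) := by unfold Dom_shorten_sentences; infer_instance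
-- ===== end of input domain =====

-- B replaces A's one-token-per-iteration trimming (with a full index re-sort each round) by a direct
-- water-filling computation of the final levelled lengths (binary search on the capped-sum function,
-- then a single building pass).  Equivalence is about the RETURN value only: Python A mutates its
-- argument list in place, B builds a fresh list.

-- ===== PORT A =====

-- key=lambda i: len(tokenized_sentences[i]); i is always a valid index when the key is applied
def pvLenKey (ts : List (List Int)) (i : Int) : Nat := (PySem.List.pyGetD ts i []).length

-- total_len = sum([len(sent) for sent in tokenized_sentences])
def pvTotal (ts : List (List Int)) : Int := (ts.map (fun sent => (sent.length : Int))).sum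

-- the while loop; fuel = (total_len - max_length).toNat is exactly the number of iterations the
-- Python loop performs on inputs satisfying Pre_ (each iteration lowers total_len by one)
def pvLoopA : Nat → List (List Int) → Int → List (List Int)
  | 0, ts, _ => ts
  | fuel + 1, ts, max_length =>
    if pvTotal ts > max_length then
      -- sorted(range(len(ts)), key=..., reverse=True)[0]
      match PySem.List.pyGet? (PySem.List.sorted (PySem.List.pyRange 0 (ts.length : Int) 1) (pvLenKey ts) true) 0 with
      | none => ts  -- Python raises IndexError here (empty list, max_length < 0): excluded by Pre_
      | some j =>
          -- ts[j] = ts[j][:-1]  (j comes from range(len(ts)), so 0 ≤ j < len ts and List.set is exact)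
          pvLoopA fuel (ts.set j.toNat (PySem.List.slice (PySem.List.pyGetD ts j []) none (some (-1)))) max_length
    else ts

def shorten_sentences (tokenized_sentences : List (List Int)) (max_length : Int) : List (List Int) :=
  pvLoopA (pvTotal tokenized_sentences - max_length).toNat tokenized_sentences max_length

-- ===== PORT B =====

-- cap_sum(level) = sum(min(x, level) for x in lengths)
def pvCapSum (lengths : List Nat) (level : Nat) : Nat := (lengths.map (fun x => min x level)).sum

-- the binary-search loop of Source B; lo, hi ≥ 0 throughout, and (lo+hi)//2 on nonnegative ints is Nat division
def pvBSearch (lengths : List Nat) (max_length : Int) (lo hi : Nat) : Nat :=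
  if _h : 1 < hi - lo then
    let mid := (lo + hi) / 2
    if (pvCapSum lengths mid : Int) ≤ max_length then pvBSearch lengths max_length mid hi
    else pvBSearch lengths max_length lo mid
  else lo
termination_by hi - lo
decreasing_by all_goals omega

-- the building loop of Source B; s is the running (Python int) counter.  sent[:L] with L ≥ 0 is take L.
def pvBuild (L : Nat) : Int → List (List Int) → List (List Int)
  | _, [] => []
  | s, sent :: rest =>
    if sent.length ≤ L then sent :: pvBuild L s rest
    else if 0 < s then sent.take L :: pvBuild L (s - 1) rest
    else sent.take (L + 1) :: pvBuild L s rest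

def shorten_sentences_alt (tokenized_sentences : List (List Int)) (max_length : Int) : List (List Int) :=
  let total : Int := (tokenized_sentences.map (fun s => (s.length : Int))).sum
  if total ≤ max_length then tokenized_sentences
  else
    let lengths := tokenized_sentences.map List.length
    -- max(lengths): lengths is nonempty whenever this branch is reached inside Pre_, and its
    -- elements are ≥ 0, so Python's max(lengths) is the running maximum from 0
    let hi := lengths.foldl max 0
    let L := pvBSearch lengths max_length 0 hi
    let s : Int := (pvCapSum lengths (L + 1) : Int) - max_length
    pvBuild L s tokenized_sentences

-- ===== PRECONDITION & SPEC =====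

-- Pre_ excludes exactly the inputs with total length > max_length < 0: there the Python loop can
-- never reach total_len ≤ max_length, so A raises IndexError (empty list) or loops forever.
def Pre_shorten_sentences (tokenized_sentences : List (List Int)) (max_length : Int) : Prop :=
  0 ≤ max_length ∨ (tokenized_sentences.map (fun s => (s.length : Int))).sum ≤ max_length

instance (tokenized_sentences : List (List Int)) (max_length : Int) : Decidable (Pre_shorten_sentences tokenized_sentences max_length) := by unfold Pre_shorten_sentences; infer_instance

def pvWitness_shorten_sentences : List (List Int) × Int := ([[1, 2], [3, 4, 5]], 3)

def Spec_shorten_sentences (tokenized_sentences : List (List Int)) (max_length : Int) (out : List (List Int)) : Prop := out = shorten_sentences_alt tokenized_sentences max_length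
instance (tokenized_sentences : List (List Int)) (max_length : Int) (out : List (List Int)) : Decidable (Spec_shorten_sentences tokenized_sentences max_length out) := by unfold Spec_shorten_sentences; infer_instance

-- ===== CLAIM (what is proved, stated in full; the proofs are below) =====
def Claim_equal_shorten_sentences : Prop := ∀ (tokenized_sentences : List (List Int)) (max_length : Int), Dom_shorten_sentences tokenized_sentences max_length → Pre_shorten_sentences tokenized_sentences max_length → Spec_shorten_sentences tokenized_sentences max_length (shorten_sentences tokenized_sentences max_length)

-- ===== LEMMAS AND PROOFS =====

theorem pvTotal_eq_raw (ts : List (List Int)) : (ts.map (fun sent => ((sent.length : Int)))).sum = ((ts.map List.length).sum : Int) := by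
  induction ts with
  | nil => simp
  | cons a l ih => simp [ih]

theorem pvTotal_eq (ts : List (List Int)) : pvTotal ts = ((ts.map List.length).sum : Int) := by
  rw [pvTotal]
  induction ts with
  | nil => simp
  | cons a l ih => simp [ih]

theorem pvCapSum_append (a b : List Nat) (L : Nat) : pvCapSum (a ++ b) L = pvCapSum a L + pvCapSum b L := by
  simp [pvCapSum]

theorem pvCapSum_cons (x : Nat) (l : List Nat) (L : Nat) : pvCapSum (x :: l) L = min x L + pvCapSum l L := by
  simp [pvCapSum]

theorem pvCapSum_zero (l : List Nat) : pvCapSum l 0 = 0 := by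
  simp [pvCapSum]

theorem pvCapSum_mono (l : List Nat) {L L' : Nat} (h : L ≤ L') : pvCapSum l L ≤ pvCapSum l L' := by
  induction l with
  | nil => simp [pvCapSum]
  | cons a l ih => simp only [pvCapSum_cons]; exact Nat.add_le_add (by omega) ih

theorem pvCapSum_of_le (l : List Nat) (L : Nat) (h : ∀ x ∈ l, x ≤ L) : pvCapSum l L = l.sum := by
  induction l with
  | nil => simp [pvCapSum]
  | cons a l ih =>
    simp only [pvCapSum_cons, List.sum_cons]
    have : a ≤ L := h a (by simp)
    rw [Nat.min_eq_left this, ih (fun x hx => h x (by simp [hx]))]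

theorem pvCapSum_le_sum (l : List Nat) (L : Nat) : pvCapSum l L ≤ l.sum := by
  induction l with
  | nil => simp [pvCapSum]
  | cons a l ih => simp only [pvCapSum_cons, List.sum_cons]; exact Nat.add_le_add (Nat.min_le_left _ _) ih

theorem pvBSearch_spec (lengths : List Nat) (m : Int) : ∀ (k lo hi : Nat), hi - lo = k → lo < hi →
    (pvCapSum lengths lo : Int) ≤ m → m < (pvCapSum lengths hi : Int) →
    lo ≤ pvBSearch lengths m lo hi ∧ pvBSearch lengths m lo hi < hi ∧
    (pvCapSum lengths (pvBSearch lengths m lo hi) : Int) ≤ m ∧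
    m < (pvCapSum lengths (pvBSearch lengths m lo hi + 1) : Int) := by
  intro k
  induction k using Nat.strong_induction_on with
  | _ k ih =>
    intro lo hi hk hlt h1 h2
    rw [pvBSearch]
    by_cases hgap : 1 < hi - lo
    · rw [dif_pos hgap]
      set mid := (lo + hi) / 2 with hmid
      by_cases hc : (pvCapSum lengths mid : Int) ≤ m
      · rw [if_pos hc]
        have := ih (hi - mid) (by omega) mid hi rfl (by omega) hc h2
        exact ⟨by omega, this.2.1, this.2.2⟩
      · rw [if_neg hc]
        have := ih (mid - lo) (by omega) lo mid rfl (by omega) h1 (by omega)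
        exact ⟨this.1, by omega, this.2.2⟩
    · rw [dif_neg hgap]
      have : hi = lo + 1 := by omega
      subst this
      exact ⟨le_refl _, by omega, h1, h2⟩

theorem pvLevel_unique (lengths : List Nat) (m : Int) {L L' : Nat}
    (h1 : (pvCapSum lengths L : Int) ≤ m) (h2 : m < (pvCapSum lengths (L + 1) : Int))
    (h3 : (pvCapSum lengths L' : Int) ≤ m) (h4 : m < (pvCapSum lengths (L' + 1) : Int)) : L = L' := by
  by_contra hne
  rcases Nat.lt_or_ge L L' with h | h
  · have := pvCapSum_mono lengths (show L + 1 ≤ L' by omega)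
    have : (pvCapSum lengths (L + 1) : Int) ≤ pvCapSum lengths L' := by exact_mod_cast this
    omega
  · have h' : L' < L := by omega
    have := pvCapSum_mono lengths (show L' + 1 ≤ L by omega)
    have : (pvCapSum lengths (L' + 1) : Int) ≤ pvCapSum lengths L := by exact_mod_cast this
    omega

theorem pvBuild_short_prefix (L : Nat) (pre : List (List Int)) : ∀ (rest : List (List Int)) (s : Int),
    (∀ y ∈ pre, y.length ≤ L) → pvBuild L s (pre ++ rest) = pre ++ pvBuild L s rest := by
  induction pre with
  | nil => intro rest s _; rfl
  | cons a pre ih =>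
    intro rest s h
    have ha : a.length ≤ L := h a (by simp)
    simp only [List.cons_append, pvBuild, if_pos ha]
    rw [ih rest s (fun y hy => h y (by simp [hy]))]

theorem pvBuild_le_succ_zero (L : Nat) (l : List (List Int))
    (h : ∀ y ∈ l, y.length ≤ L + 1) : pvBuild L 0 l = l := by
  induction l with
  | nil => rfl
  | cons a l ih =>
    have ha : a.length ≤ L + 1 := h a (by simp)
    by_cases hs : a.length ≤ L
    · simp only [pvBuild, if_pos hs]; rw [ih (fun y hy => h y (by simp [hy]))]
    · simp only [pvBuild, if_neg hs, if_neg (by omega : ¬ (0:Int) < 0)]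
      rw [List.take_of_length_le ha, ih (fun y hy => h y (by simp [hy]))]

theorem pvBuild_congr_long (L : Nat) (a b : List Int) (ha : L < a.length) (hb : L < b.length)
    (h1 : a.take L = b.take L) (h2 : a.take (L + 1) = b.take (L + 1)) :
    ∀ (pre : List (List Int)) (s : Int) (post : List (List Int)),
      pvBuild L s (pre ++ a :: post) = pvBuild L s (pre ++ b :: post) := by
  intro pre
  induction pre with
  | nil =>
    intro s post
    simp only [List.nil_append, pvBuild, if_neg (by omega : ¬ a.length ≤ L), if_neg (by omega : ¬ b.length ≤ L)]
    by_cases hs : (0:Int) < s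
    · rw [if_pos hs, if_pos hs, h1]
    · rw [if_neg hs, if_neg hs, h2]
  | cons x pre ih =>
    intro s post
    simp only [List.cons_append, pvBuild]
    by_cases hx : x.length ≤ L
    · rw [if_pos hx, if_pos hx, ih]
    · rw [if_neg hx, if_neg hx]
      by_cases hs : (0:Int) < s
      · rw [if_pos hs, if_pos hs, ih]
      · rw [if_neg hs, if_neg hs, ih]

theorem head?_insertBy (bf : Int → Int → Bool) (x : Int) (acc : List Int) :
    (PySem.List.insertBy bf x acc).head? =
      some (match acc with | [] => x | y :: _ => if bf x y then x else y) := by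
  cases acc with
  | nil => rfl
  | cons y ys =>
    simp only [PySem.List.insertBy]
    by_cases h : bf x y
    · simp [h]
    · simp [h]

theorem head?_foldl_insertBy (bf : Int → Int → Bool) : ∀ (xs : List Int) (acc : List Int),
    (xs.foldl (fun a x => PySem.List.insertBy bf x a) acc).head? =
      xs.foldl (fun h? x => some (match h? with | none => x | some h => if bf x h then x else h)) acc.head? := by
  intro xs
  induction xs with
  | nil => intro acc; rfl
  | cons x xs ih =>
    intro acc
    simp only [List.foldl_cons]
    rw [ih, head?_insertBy]
    congr 1
    cases acc <;> rfl

theorem foldl_opt_some (bf : Int → Int → Bool) : ∀ (xs : List Int) (h : Int),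
    xs.foldl (fun h? x => some (match h? with | none => x | some hh => if bf x hh then x else hh)) (some h) =
      some (xs.foldl (fun c x => if bf x c then x else c) h) := by
  intro xs
  induction xs with
  | nil => intro h; rfl
  | cons x xs ih =>
    intro h
    simp only [List.foldl_cons]
    rw [ih]

theorem pvArgmaxFold (key : Int → Nat) (n : Int) : ∀ (k : Nat) (a h : Int), (n - a).toNat = k →
    0 ≤ h → h < a → a ≤ n →
    (∀ i, 0 ≤ i → i < a → key i ≤ key h) → (∀ i, 0 ≤ i → i < h → key i < key h) →
    0 ≤ ((PySem.List.pyRange a n 1).foldl (fun c i => if key c < key i then i else c) h) ∧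
    ((PySem.List.pyRange a n 1).foldl (fun c i => if key c < key i then i else c) h) < n ∧
    (∀ i, 0 ≤ i → i < n → key i ≤ key ((PySem.List.pyRange a n 1).foldl (fun c i => if key c < key i then i else c) h)) ∧
    (∀ i, 0 ≤ i → i < ((PySem.List.pyRange a n 1).foldl (fun c i => if key c < key i then i else c) h) → key i < key ((PySem.List.pyRange a n 1).foldl (fun c i => if key c < key i then i else c) h)) := by
  intro k
  induction k with
  | zero =>
    intro a h hk h0 hha han hle hlt
    have hna : n ≤ a := by omega
    rw [PySem.List.pyRange_one_eq_nil hna]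
    simp only [List.foldl_nil]
    have han' : a = n := le_antisymm han hna
    exact ⟨h0, by omega, fun i hi1 hi2 => hle i hi1 (by omega), hlt⟩
  | succ k ih =>
    intro a h hk h0 hha han hle hlt
    have hlt_an : a < n := by omega
    rw [PySem.List.pyRange_one_cons hlt_an]
    simp only [List.foldl_cons]
    by_cases hc : key h < key a
    · rw [if_pos hc]
      exact ih (a + 1) a (by omega) (by omega) (by omega) (by omega)
        (fun i hi1 hi2 => by
          rcases lt_or_eq_of_le (show i ≤ a by omega) with h' | h'
          · exact le_of_lt (lt_of_le_of_lt (hle i hi1 h') hc)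
          · subst h'; exact le_refl _)
        (fun i hi1 hi2 => lt_of_le_of_lt (hle i hi1 hi2) hc)
    · rw [if_neg hc]
      exact ih (a + 1) h (by omega) h0 (by omega) (by omega)
        (fun i hi1 hi2 => by
          rcases lt_or_eq_of_le (show i ≤ a by omega) with h' | h'
          · exact hle i hi1 h'
          · subst h'; omega)
        hlt

theorem sorted_head (key : Int → Nat) (n : Int) (hn : 0 < n) :
    ∃ j : Int, PySem.List.pyGet? (PySem.List.sorted (PySem.List.pyRange 0 n 1) key true) 0 = some j ∧
      0 ≤ j ∧ j < n ∧ (∀ i, 0 ≤ i → i < n → key i ≤ key j) ∧ (∀ i, 0 ≤ i → i < j → key i < key j) := by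
  set bf : Int → Int → Bool := fun a b => decide (key b < key a) with hbf
  have hsort := PySem.List.sorted_rev_eq_foldl_insertBy (PySem.List.pyRange 0 n 1) key
  set j := (PySem.List.pyRange 1 n 1).foldl (fun c i => if key c < key i then i else c) 0 with hj
  have hprops := pvArgmaxFold key n (n - 1).toNat 1 0 (by omega) (by omega) (by omega) (by omega)
    (fun i hi1 hi2 => le_of_eq (congrArg key (by omega))) (fun i hi1 hi2 => by omega)
  refine ⟨j, ?_, hprops.1, hprops.2.1, hprops.2.2.1, hprops.2.2.2⟩
  have hhead : (PySem.List.sorted (PySem.List.pyRange 0 n 1) key true).head? = some j := by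
    rw [hsort, head?_foldl_insertBy, PySem.List.pyRange_one_cons hn]
    simp only [List.head?_nil, List.foldl_cons]
    rw [foldl_opt_some]
    congr 1
    apply PySem.List.foldl_congr_mem
    intro acc x _
    by_cases h : key acc < key x
    · simp [h]
    · simp [h]
  cases hs : PySem.List.sorted (PySem.List.pyRange 0 n 1) key true with
  | nil => rw [hs] at hhead; simp at hhead
  | cons y ys =>
    rw [hs] at hhead
    simp only [List.head?_cons, Option.some.injEq] at hhead
    rw [PySem.List.pyGet?_zero_cons, hhead]

theorem alt_of_le (ts : List (List Int)) (m : Int) (h : (((ts.map List.length).sum : Nat) : Int) ≤ m) :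
    shorten_sentences_alt ts m = ts := by
  simp only [shorten_sentences_alt]
  rw [if_pos (by rw [pvTotal_eq_raw]; exact h)]

theorem alt_of_gt (ts : List (List Int)) (m : Int) (h : m < (((ts.map List.length).sum : Nat) : Int)) :
    shorten_sentences_alt ts m =
      pvBuild (pvBSearch (ts.map List.length) m 0 ((ts.map List.length).foldl max 0))
        ((pvCapSum (ts.map List.length) (pvBSearch (ts.map List.length) m 0 ((ts.map List.length).foldl max 0) + 1) : Int) - m) ts := by
  simp only [shorten_sentences_alt]
  rw [if_neg (by rw [pvTotal_eq_raw]; omega)]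

theorem step_alt (P Q : List (List Int)) (c : List Int) (m : Int)
    (hP : ∀ y ∈ P, y.length < c.length) (hQ : ∀ y ∈ Q, y.length ≤ c.length)
    (hm : 0 ≤ m) (ht : m < (((P ++ c :: Q).map List.length).sum : Int)) :
    shorten_sentences_alt (P ++ c.dropLast :: Q) m = shorten_sentences_alt (P ++ c :: Q) m := by
  set lA := P.map List.length with hlA
  set lB := Q.map List.length with hlB
  set x := c.length with hx
  have hlAmem : ∀ y ∈ lA, y < x := by
    intro y hy; rw [hlA] at hy; obtain ⟨z, hz, rfl⟩ := List.mem_map.1 hy; exact hP z hz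
  have hlBmem : ∀ y ∈ lB, y ≤ x := by
    intro y hy; rw [hlB] at hy; obtain ⟨z, hz, rfl⟩ := List.mem_map.1 hy; exact hQ z hz
  have hlens : (P ++ c :: Q).map List.length = lA ++ x :: lB := by simp [hlA, hlB, hx]
  rw [hlens] at ht
  have hx1 : 1 ≤ x := by
    by_contra hx0
    have hx0 : x = 0 := by omega
    have hz : (lA ++ x :: lB).sum = 0 := by
      apply List.sum_eq_zero
      intro v hv
      rcases List.mem_append.1 hv with h | h
      · exact absurd (hlAmem v h) (by omega)
      · rcases List.mem_cons.1 h with h | h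
        · omega
        · have := hlBmem v h; omega
    rw [hz] at ht
    simp at ht
    omega
  have hcne : c ≠ [] := List.ne_nil_of_length_pos (by omega)
  have hlens' : (P ++ c.dropLast :: Q).map List.length = lA ++ (x - 1) :: lB := by
    simp only [List.map_append, List.map_cons, List.length_dropLast, hlA, hlB, hx]
  set T := (lA ++ x :: lB).sum with hT
  have hTsplit : T = lA.sum + x + lB.sum := by rw [hT]; simp [List.sum_append]; omega
  have hT' : (lA ++ (x - 1) :: lB).sum = T - 1 := by simp [List.sum_append]; omega
  have htT : m < (T : Int) := ht
  have hT1 : 1 ≤ T := by omega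
  set hi := (lA ++ x :: lB).foldl max 0 with hhi
  have hub := PySem.List.le_foldl_max (lA ++ x :: lB) 0
  have hxhi : x ≤ hi := hub.2 x (by simp)
  have hcap0 : (pvCapSum (lA ++ x :: lB) 0 : Int) ≤ m := by rw [pvCapSum_zero]; exact_mod_cast hm
  have hcaphi : m < (pvCapSum (lA ++ x :: lB) hi : Int) := by
    rw [pvCapSum_of_le _ _ hub.2]; exact htT
  set L := pvBSearch (lA ++ x :: lB) m 0 hi with hL
  have hBS := pvBSearch_spec (lA ++ x :: lB) m (hi - 0) 0 hi rfl (by omega) hcap0 hcaphi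
  rw [← hL] at hBS
  have hallx : ∀ y ∈ lA ++ x :: lB, y ≤ x := by
    intro y hy
    rcases List.mem_append.1 hy with h | h
    · exact le_of_lt (hlAmem y h)
    · rcases List.mem_cons.1 h with h | h
      · omega
      · exact hlBmem y h
  have hcapx : pvCapSum (lA ++ x :: lB) x = T := by rw [pvCapSum_of_le _ _ hallx]
  have hLx : L < x := by
    by_contra hxL
    have h1 := pvCapSum_mono (lA ++ x :: lB) (show x ≤ L by omega)
    rw [hcapx] at h1
    have h2 : (T : Int) ≤ (pvCapSum (lA ++ x :: lB) L : Int) := by exact_mod_cast h1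
    have := hBS.2.2.1
    omega
  have hcap_eq : ∀ l2 : Nat, l2 ≤ x - 1 →
      pvCapSum (lA ++ (x - 1) :: lB) l2 = pvCapSum (lA ++ x :: lB) l2 := by
    intro l2 hl2
    rw [pvCapSum_append, pvCapSum_append, pvCapSum_cons, pvCapSum_cons]
    have : min (x - 1) l2 = min x l2 := by omega
    rw [this]
  have hPle : ∀ y ∈ P, y.length ≤ x - 1 := fun y hy => by have := hP y hy; omega
  by_cases hc : ((T : Int) - 1 ≤ m)
  · -- m = T - 1: one single trim remains; B's build performs exactly it
    have hmT : m = (T : Int) - 1 := by omega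
    rw [alt_of_le _ _ (by rw [hlens', hT']; omega)]
    rw [alt_of_gt _ _ (by rw [hlens]; exact htT)]
    rw [hlens, ← hhi, ← hL]
    have hgood1 : (pvCapSum (lA ++ x :: lB) (x - 1) : Int) ≤ m := by
      have h1 : pvCapSum (lA ++ (x-1) :: lB) (x - 1) = pvCapSum (lA ++ x :: lB) (x-1) := hcap_eq (x-1) (le_refl _)
      have h2 : pvCapSum (lA ++ (x-1) :: lB) (x - 1) ≤ (lA ++ (x-1) :: lB).sum := pvCapSum_le_sum _ _
      rw [hT'] at h2
      rw [← h1]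
      have h3 : (pvCapSum (lA ++ (x-1) :: lB) (x - 1) : Int) ≤ (T : Int) - 1 := by omega
      omega
    have hgood2 : m < (pvCapSum (lA ++ x :: lB) (x - 1 + 1) : Int) := by
      rw [show x - 1 + 1 = x by omega, hcapx]; omega
    have hLeq : L = x - 1 := pvLevel_unique (lA ++ x :: lB) m hBS.2.2.1 hBS.2.2.2 hgood1 hgood2
    have hseq : (pvCapSum (lA ++ x :: lB) (L + 1) : Int) - m = 1 := by
      rw [hLeq, show x - 1 + 1 = x by omega, hcapx]; omega
    rw [hseq, hLeq]
    rw [pvBuild_short_prefix (x-1) P (c :: Q) 1 hPle]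
    have hclong : ¬ (c.length ≤ x - 1) := by omega
    simp only [pvBuild, if_neg hclong, if_pos (show (0:Int) < 1 by omega)]
    rw [show (1 : Int) - 1 = 0 by omega,
      pvBuild_le_succ_zero (x-1) Q (fun y hy => by have := hQ y hy; omega), ← List.dropLast_eq_take]
  · -- still over-long after the trim: level and output are unchanged
    rw [not_le] at hc
    have htT' : m < ((T - 1 : Nat) : Int) := by omega
    rw [alt_of_gt _ _ (by rw [hlens', hT']; exact htT')]
    rw [alt_of_gt _ _ (by rw [hlens]; exact htT)]
    rw [hlens, hlens', ← hhi, ← hL]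
    set hi' := (lA ++ (x - 1) :: lB).foldl max 0 with hhi'
    have hub' := PySem.List.le_foldl_max (lA ++ (x - 1) :: lB) 0
    have hcap0' : (pvCapSum (lA ++ (x - 1) :: lB) 0 : Int) ≤ m := by rw [pvCapSum_zero]; exact_mod_cast hm
    have hcaphi' : m < (pvCapSum (lA ++ (x - 1) :: lB) hi' : Int) := by
      rw [pvCapSum_of_le _ _ hub'.2, hT']; exact htT'
    have hhi'pos : 0 < hi' := by
      by_contra hh
      have hh0 : hi' = 0 := by omega
      have := pvCapSum_of_le (lA ++ (x - 1) :: lB) hi' hub'.2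
      rw [hh0, pvCapSum_zero] at this
      rw [hT'] at this
      omega
    set L' := pvBSearch (lA ++ (x - 1) :: lB) m 0 hi' with hL'
    have hBS' := pvBSearch_spec (lA ++ (x - 1) :: lB) m (hi' - 0) 0 hi' rfl (by omega) hcap0' hcaphi'
    rw [← hL'] at hBS'
    -- L is also the level of the trimmed list
    have hgood1' : (pvCapSum (lA ++ (x - 1) :: lB) L : Int) ≤ m := by
      rw [hcap_eq L (by omega)]; exact hBS.2.2.1
    have hgood2' : m < (pvCapSum (lA ++ (x - 1) :: lB) (L + 1) : Int) := by
      by_cases hLe : L + 1 ≤ x - 1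
      · rw [hcap_eq (L+1) hLe]; exact hBS.2.2.2
      · have hLsucc : L + 1 = x := by omega
        have hall' : ∀ y ∈ lA ++ (x - 1) :: lB, y ≤ x := by
          intro y hy
          rcases List.mem_append.1 hy with h | h
          · exact le_of_lt (hlAmem y h)
          · rcases List.mem_cons.1 h with h | h
            · omega
            · exact hlBmem y h
        rw [hLsucc, pvCapSum_of_le _ _ (fun y hy => by have := hall' y hy; omega), hT']
        exact htT'
    have hLeq : L' = L := pvLevel_unique (lA ++ (x - 1) :: lB) m hBS'.2.2.1 hBS'.2.2.2 hgood1' hgood2'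
    rw [hLeq]
    by_cases hLe : L + 1 ≤ x - 1
    · -- the boundary is strictly below the trimmed sentence: identical builds
      have hscnt : pvCapSum (lA ++ (x - 1) :: lB) (L + 1) = pvCapSum (lA ++ x :: lB) (L + 1) := hcap_eq (L+1) hLe
      rw [hscnt]
      exact pvBuild_congr_long L c.dropLast c (by rw [List.length_dropLast]; omega) (by omega)
        (by rw [List.dropLast_eq_take, List.take_take]; congr 1; omega)
        (by rw [List.dropLast_eq_take, List.take_take]; congr 1; omega) P _ Q
    · -- the trimmed sentence sits exactly at the boundary: one fewer boundary trim
      have hLsucc : L + 1 = x := by omega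
      have hcnt : pvCapSum (lA ++ x :: lB) (L + 1) = T := by rw [hLsucc, hcapx]
      have hcnt' : pvCapSum (lA ++ (x - 1) :: lB) (L + 1) = T - 1 := by
        have hall' : ∀ y ∈ lA ++ (x - 1) :: lB, y ≤ L + 1 := by
          intro y hy
          rcases List.mem_append.1 hy with h | h
          · have := hlAmem y h; omega
          · rcases List.mem_cons.1 h with h | h
            · omega
            · have := hlBmem y h; omega
        rw [pvCapSum_of_le _ _ hall', hT']
      rw [hcnt, hcnt']
      have hPle' : ∀ y ∈ P, y.length ≤ L := fun y hy => by have := hP y hy; omega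
      rw [pvBuild_short_prefix L P (c.dropLast :: Q) _ hPle', pvBuild_short_prefix L P (c :: Q) _ hPle']
      have hclong : ¬ (c.length ≤ L) := by omega
      have hdlshort : c.dropLast.length ≤ L := by rw [List.length_dropLast]; omega
      simp only [pvBuild, if_pos hdlshort, if_neg hclong]
      rw [if_pos (show (0:Int) < (T:Int) - m by omega)]
      have e1 : c.dropLast = List.take L c := by
        rw [List.dropLast_eq_take]; congr 1; omega
      have e2 : ((T - 1 : Nat) : Int) - m = (T : Int) - m - 1 := by omega
      rw [e1, e2]

theorem pvLenKey_nat (ts : List (List Int)) (i : Nat) (h : i < ts.length) :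
    pvLenKey ts (i : Int) = ts[i].length := by
  simp only [pvLenKey, PySem.List.pyGetD_natCast]
  rw [List.getD_eq_getElem _ _ h]

theorem loop_eq (m : Int) (hm : 0 ≤ m) : ∀ (fuel : Nat) (ts : List (List Int)),
    (pvTotal ts - m).toNat ≤ fuel → pvLoopA fuel ts m = shorten_sentences_alt ts m := by
  intro fuel
  induction fuel with
  | zero =>
    intro ts hf
    have hle : pvTotal ts ≤ m := by omega
    rw [pvLoopA, alt_of_le ts m (by rw [← pvTotal_eq]; exact hle)]
  | succ fuel ih =>
    intro ts hf
    rw [pvLoopA]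
    by_cases hgt : pvTotal ts > m
    · rw [if_pos hgt]
      have hT0 : (0:Int) < pvTotal ts := lt_of_le_of_lt hm hgt
      have hne : ts ≠ [] := by
        intro h; rw [h] at hT0; simp [pvTotal] at hT0
      have hn : (0:Int) < (ts.length : Int) := by
        have := List.length_pos_iff.2 hne
        exact_mod_cast this
      obtain ⟨j, hjget, hj0, hjn, hmax, hfirst⟩ := sorted_head (pvLenKey ts) (ts.length : Int) hn
      rw [hjget]
      dsimp only
      have hjlt : j.toNat < ts.length := by omega
      have hjcast : (j.toNat : Int) = j := by omega
      set c := ts[j.toNat] with hc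
      -- the updated list, in decomposed form
      have hgetD : PySem.List.pyGetD ts j [] = c := by
        rw [← hjcast]
        simp only [PySem.List.pyGetD_natCast]
        rw [List.getD_eq_getElem _ _ hjlt]
      have hupd : ts.set j.toNat (PySem.List.slice (PySem.List.pyGetD ts j []) none (some (-1)))
          = ts.take j.toNat ++ c.dropLast :: ts.drop (j.toNat + 1) := by
        rw [hgetD, PySem.List.slice_to_neg_one, List.set_eq_take_cons_drop _ hjlt]
      have hdecomp : ts = ts.take j.toNat ++ c :: ts.drop (j.toNat + 1) := by
        conv_lhs => rw [← List.take_append_drop j.toNat ts]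
        rw [List.drop_eq_getElem_cons hjlt]
      -- lengths of prefix elements are strictly smaller, of suffix elements at most c.length
      have hkeyj : pvLenKey ts j = c.length := by rw [← hjcast, pvLenKey_nat ts j.toNat hjlt]
      have hP : ∀ y ∈ ts.take j.toNat, y.length < c.length := by
        intro y hy
        rw [List.mem_take_iff_getElem] at hy
        obtain ⟨i, hi, rfl⟩ := hy
        have hilt : i < ts.length := by omega
        have := hfirst (i : Int) (by omega) (by omega)
        rw [pvLenKey_nat ts i hilt, hkeyj] at this
        exact this
      have hQ : ∀ y ∈ ts.drop (j.toNat + 1), y.length ≤ c.length := by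
        intro y hy
        rw [List.mem_drop_iff_getElem] at hy
        obtain ⟨i, hi, rfl⟩ := hy
        have hilt : j.toNat + 1 + i < ts.length := by omega
        have := hmax ((j.toNat + 1 + i : Nat) : Int) (by omega) (by exact_mod_cast (by omega : j.toNat + 1 + i < ts.length))
        rw [pvLenKey_nat ts (j.toNat + 1 + i) hilt, hkeyj] at this
        exact this
      -- totals
      have hsum : pvTotal ts = ((ts.take j.toNat ++ c :: ts.drop (j.toNat + 1)).map List.length).sum := by
        rw [pvTotal_eq]; rw [← hdecomp]
      have hc1 : 1 ≤ c.length := by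
        by_contra hc0
        have hc0 : c.length = 0 := by omega
        have hz : (ts.map List.length).sum = 0 := by
          apply List.sum_eq_zero
          intro v hv
          obtain ⟨z, hz, rfl⟩ := List.mem_map.1 hv
          obtain ⟨i, hilt, rfl⟩ := List.mem_iff_getElem.1 hz
          have := hmax ((i : Nat) : Int) (by omega) (by exact_mod_cast hilt)
          rw [pvLenKey_nat ts i hilt, hkeyj, hc0] at this
          omega
        rw [pvTotal_eq, hz] at hT0
        simp at hT0
      have hsum' : pvTotal (ts.take j.toNat ++ c.dropLast :: ts.drop (j.toNat + 1)) = pvTotal ts - 1 := by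
        rw [pvTotal_eq, pvTotal_eq]
        conv_rhs => rw [hdecomp]
        simp only [List.map_append, List.map_cons, List.sum_append, List.sum_cons, List.length_dropLast]
        push_cast
        omega
      rw [hupd, ih _ (by rw [hsum']; omega)]
      rw [step_alt _ _ _ _ hP hQ hm (by rw [← hsum]; exact hgt), ← hdecomp]
    · rw [if_neg hgt]
      rw [alt_of_le ts m (by rw [← pvTotal_eq]; omega)]

-- ===== VERDICT (by name: the statement is the Claim_ definition above) =====
theorem shorten_sentences_spec : Claim_equal_shorten_sentences := by
  intro ts m _ hpre
  unfold Spec_shorten_sentences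
  unfold Pre_shorten_sentences at hpre
  rcases hpre with hm | hle
  · exact loop_eq m hm _ ts (le_refl _)
  · have hle' : pvTotal ts ≤ m := hle
    have h0 : (pvTotal ts - m).toNat = 0 := by omega
    rw [shorten_sentences, h0, pvLoopA, alt_of_le ts m (by rw [← pvTotal_eq]; exact hle')]
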